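-- pv_equiv track=rewrite | github.com/huaji1437/Fake-Order-Generator | chinese_to_int.py | int_to_chinese_op
-- ===== SOURCE A (Python) =====
-- from typing import Optional
--
-- num_to_chinese_arr = ['零', '一', '二', '三', '四', '五', '六', '七', '八', '九']
--
-- def int_to_chinese_op(num: int) -> Optional[str]:
--     if num < 0:
--         raise ValueError("只能转换非负整数")
--     if num == 0:
--         return num_to_chinese_arr[0]
--     chinese_num = ""
--     while num > 0:
--         digit = num % 10
--         chinese_num = num_to_chinese_arr[digit] + chinese_num
--         num //= 10
--     return chinese_num
-- ===== SOURCE B (Python) =====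
-- num_to_chinese_arr = ['零', '一', '二', '三', '四', '五', '六', '七', '八', '九']
--
--
-- def int_to_chinese_op(num):
--     if num < 0:
--         raise ValueError("只能转换非负整数")
--     return ''.join(num_to_chinese_arr[int(c)] for c in str(num))
-- ===== Notes on version B (the rewrite author's own statement) =====
-- stated objective: idiomatic
-- what changed: B maps the characters of str(num) left-to-right through the digit table and joins, instead of A's divmod-by-10 loop that prepends digits right-to-left; the zero special case disappears.
import Mathlib
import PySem

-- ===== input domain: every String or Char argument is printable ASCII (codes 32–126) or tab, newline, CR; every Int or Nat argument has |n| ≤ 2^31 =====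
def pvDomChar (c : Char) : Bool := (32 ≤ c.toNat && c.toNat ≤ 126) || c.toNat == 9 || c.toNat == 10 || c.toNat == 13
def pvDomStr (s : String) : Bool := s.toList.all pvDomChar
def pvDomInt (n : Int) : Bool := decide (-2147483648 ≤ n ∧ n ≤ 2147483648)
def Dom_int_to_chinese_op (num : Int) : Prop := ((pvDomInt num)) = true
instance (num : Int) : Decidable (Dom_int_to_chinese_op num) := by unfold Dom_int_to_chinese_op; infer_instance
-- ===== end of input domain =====

-- B iterates over the characters of str(num) left-to-right instead of A's divmod-by-10 loop; equal on all non-negative inputs.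

-- num_to_chinese_arr (each entry is a single Chinese character)
def numToChineseArr : List Char := ['零', '一', '二', '三', '四', '五', '六', '七', '八', '九']

-- ===== PORT A =====
-- the while loop: num > 0 → digit = num % 10; prepend arr[digit]; num //= 10
def intToChineseLoop : Nat → List Char → List Char
  | 0, acc => acc
  | n+1, acc => intToChineseLoop ((n+1) / 10) (numToChineseArr.getD ((n+1) % 10) ' ' :: acc)
decreasing_by exact Nat.div_lt_self (Nat.succ_pos n) (by omega)

def int_to_chinese_op (num : Int) : Option String :=
  if num < 0 then none                                -- raise ValueError
  else if num = 0 then some (String.mk [numToChineseArr.getD 0 ' '])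
  else some (String.mk (intToChineseLoop num.toNat []))

-- ===== PORT B =====
-- ''.join(num_to_chinese_arr[int(c)] for c in str(num)); int(c) on a decimal digit char is exactly c.toNat - 48
def int_to_chinese_op_alt (num : Int) : Option String :=
  if num < 0 then none                                -- raise ValueError
  else some (String.mk ((PySem.Int.toChars num).map
    (fun c => numToChineseArr.getD (c.toNat - 48) ' ')))

-- ===== PRECONDITION & SPEC =====
-- A raises ValueError exactly on negative input
def Pre_int_to_chinese_op (num : Int) : Prop := 0 ≤ num
instance (num : Int) : Decidable (Pre_int_to_chinese_op num) := by unfold Pre_int_to_chinese_op; infer_instance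
def pvWitness_int_to_chinese_op : Int := (10)

def Spec_int_to_chinese_op (num : Int) (out : Option String) : Prop := out = int_to_chinese_op_alt num
instance (num : Int) (out : Option String) : Decidable (Spec_int_to_chinese_op num out) := by unfold Spec_int_to_chinese_op; infer_instance

-- ===== CLAIM (what is proved, stated in full; the proofs are below) =====
def Claim_equal_int_to_chinese_op : Prop := ∀ (num : Int), Dom_int_to_chinese_op num → Pre_int_to_chinese_op num → Spec_int_to_chinese_op num (int_to_chinese_op num)

-- ===== LEMMAS AND PROOFS =====

theorem digitChar_toNat_sub (d : Nat) (hd : d < 10) : (Nat.digitChar d).toNat - 48 = d := by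
  interval_cases d <;> decide

theorem intToChineseLoop_eq_map (n : Nat) (hn : 0 < n) (acc : List Char) :
    intToChineseLoop n acc =
      (Nat.toDigits 10 n).map (fun c => numToChineseArr.getD (c.toNat - 48) ' ') ++ acc := by
  induction n using Nat.strong_induction_on generalizing acc with
  | _ n ih =>
    match n, hn with
    | m+1, _ =>
      rw [intToChineseLoop]
      rw [Nat.toDigits_eq_if (by omega : 1 < 10)]
      by_cases h : m + 1 < 10
      · have h0 : (m+1) / 10 = 0 := Nat.div_eq_of_lt h
        rw [h0, intToChineseLoop]
        simp [h, digitChar_toNat_sub _ h, Nat.mod_eq_of_lt h]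
      · have hdiv : 0 < (m+1) / 10 := Nat.div_pos (by omega) (by omega)
        rw [ih ((m+1)/10) (Nat.div_lt_self (Nat.succ_pos m) (by omega)) hdiv]
        simp [h, digitChar_toNat_sub _ (Nat.mod_lt _ (by omega))]

-- ===== VERDICT (by name: the statement is the Claim_ definition above) =====
theorem int_to_chinese_op_spec : Claim_equal_int_to_chinese_op := by
  intro num _ hpre
  have hpre' : (0:Int) ≤ num := hpre
  have hnn : ¬ num < 0 := not_lt.2 hpre'
  unfold Spec_int_to_chinese_op int_to_chinese_op int_to_chinese_op_alt
  by_cases h0 : num = 0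
  · subst h0
    norm_num [PySem.Int.toChars, Nat.toDigits_zero]
    decide
  · rw [if_neg hnn, if_neg h0, if_neg hnn]
    rw [intToChineseLoop_eq_map num.toNat (by omega) []]
    simp [PySem.Int.toChars, hnn]
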